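-- pv_equiv track=rewrite | github.com/InfFMS/pythonless4-Vadim-svo | task9.py | step
-- ===== SOURCE A (Python) =====
-- def step(N, c):
--     if N == 1:
--         return('YES')
--     else:
--         if c <= N:
--             if N == c:
--                 return('YES')
--             else:
--                 c *= 2
--                 return(step(N, c))
--         else:
--             return('NO')
-- ===== SOURCE B (Python) =====
-- def step(N, c):
--     if N == 1 or N == c:
--         return 'YES'
--     if c <= 0 or N % c != 0:
--         return 'NO'
--     q = N // c
--     while q % 2 == 0 and q > 1:
--         q //= 2
--     return 'YES' if q == 1 else 'NO'
-- ===== Notes on version B (the rewrite author's own statement) =====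
-- stated objective: alternative
-- what changed: Replaces the recursive doubling of c with arithmetic: answer YES iff N==1, N==c, or c divides N and the quotient N//c, stripped of its factors of two by a halving loop, is 1.
import Mathlib
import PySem

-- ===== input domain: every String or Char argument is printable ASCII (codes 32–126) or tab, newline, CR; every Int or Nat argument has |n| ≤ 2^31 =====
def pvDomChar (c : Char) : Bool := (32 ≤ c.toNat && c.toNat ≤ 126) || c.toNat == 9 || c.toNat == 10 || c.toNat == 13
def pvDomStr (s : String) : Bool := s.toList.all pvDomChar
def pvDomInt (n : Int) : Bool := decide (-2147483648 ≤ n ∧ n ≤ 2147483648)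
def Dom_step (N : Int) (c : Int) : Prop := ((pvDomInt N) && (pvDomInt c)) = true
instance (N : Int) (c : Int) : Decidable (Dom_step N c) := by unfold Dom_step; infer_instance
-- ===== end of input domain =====

-- B answers by arithmetic (divisibility + stripping factors of two from the quotient) instead of A's recursive doubling of c.
-- ===== PORT A =====
-- Fuel makes A's (otherwise possibly non-terminating) recursion total; inside Pre_step the fuel is always sufficient.
def stepFuel : Nat → Int → Int → String
  | 0, _, _ => "NO"
  | f+1, N, c =>
    if N = 1 then "YES"
    else if c ≤ N then (if N = c then "YES" else stepFuel f N (c * 2))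
    else "NO"

def step (N : Int) (c : Int) : String := stepFuel ((N - c).toNat + 1) N c

-- ===== PORT B =====
-- the `while q % 2 == 0 and q > 1: q //= 2` loop; fuel q.toNat always suffices (q at least halves each round)
def stripTwos : Nat → Int → Int
  | 0, q => q
  | f+1, q =>
    if PySem.Int.mod q 2 = 0 ∧ 1 < q then stripTwos f (PySem.Int.floordiv q 2) else q

def step_alt (N : Int) (c : Int) : String :=
  if N = 1 ∨ N = c then "YES"
  else if c ≤ 0 ∨ PySem.Int.mod N c ≠ 0 then "NO"
  else
    let q := PySem.Int.floordiv N c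
    if stripTwos q.toNat q = 1 then "YES" else "NO"

-- ===== PRECONDITION & SPEC =====
-- Pre_ excludes exactly the inputs on which Python A recurses forever (RecursionError): N ≠ 1, c ≤ 0 and c < N, where doubling never moves c past N.
def Pre_step (N : Int) (c : Int) : Prop := N = 1 ∨ 1 ≤ c ∨ N ≤ c
instance (N : Int) (c : Int) : Decidable (Pre_step N c) := by unfold Pre_step; infer_instance
def pvWitness_step : Int × Int := (8, 1)

def Spec_step (N : Int) (c : Int) (out : String) : Prop := out = step_alt N c
instance (N : Int) (c : Int) (out : String) : Decidable (Spec_step N c out) := by unfold Spec_step; infer_instance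

-- ===== CLAIM (what is proved, stated in full; the proofs are below) =====
def Claim_equal_step : Prop := ∀ (N : Int) (c : Int), Dom_step N c → Pre_step N c → Spec_step N c (step N c)

-- ===== LEMMAS AND PROOFS =====

-- If N is never of the form c·2^j, A's loop answers "NO" at any fuel.
theorem stepFuel_no (f : Nat) (N c : Int) (h1 : N ≠ 1)
    (h : ∀ j : Nat, N ≠ c * 2 ^ j) : stepFuel f N c = "NO" := by
  induction f generalizing c with
  | zero => rfl
  | succ f ih =>
    simp only [stepFuel, if_neg h1]
    split_ifs with hle heq
    · exact absurd heq (by simpa using h 0)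
    · exact ih (c * 2) (by intro j hj; exact h (j + 1) (by rw [hj]; ring))
    · rfl

-- stripTwos does nothing when the guard fails at once
theorem stripTwos_of_le_one (f : Nat) (q : Int) (h : q ≤ 1) : stripTwos f q = q := by
  cases f with
  | zero => rfl
  | succ f => simp only [stripTwos]; rw [if_neg]; omega

-- one unfolding of B's halving loop when q is even and > 1
theorem stripTwos_even (g : Nat) (q : Int) (h2 : 2 ≤ q) (hev : q % 2 = 0) :
    stripTwos (g + 1) q = stripTwos g (q / 2) := by
  have hmod : PySem.Int.mod q 2 = q % 2 := PySem.Int.mod_eq_emod_of_pos (by omega)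
  have hdiv : PySem.Int.floordiv q 2 = q / 2 := PySem.Int.floordiv_eq_ediv_of_pos (by omega)
  simp only [stripTwos]
  rw [if_pos ⟨by omega, by omega⟩, hdiv]

-- B's halving loop is stuck on an odd q
theorem stripTwos_odd (g : Nat) (q : Int) (hod : q % 2 ≠ 0) : stripTwos g q = q := by
  have hq2 : PySem.Int.mod q 2 ≠ 0 := by
    rcases le_or_gt q 0 with h | h
    · intro hc
      have := PySem.Int.floordiv_mul_add_mod q 2
      have h2 : (2:Int) ∣ q := ⟨PySem.Int.floordiv q 2, by omega⟩
      omega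
    · rw [PySem.Int.mod_eq_emod_of_pos (by omega)]; exact hod
  cases g with
  | zero => rfl
  | succ g => simp only [stripTwos]; rw [if_neg (by rintro ⟨h, -⟩; exact hq2 h)]

-- Main bridge: for c ≥ 1, q ≥ 2, A's doubling loop on N = c*q matches B's halving loop on q.
theorem bridge (n : Nat) : ∀ (q c : Int) (f g : Nat), 1 ≤ c → 2 ≤ q → q.toNat ≤ n →
    q.toNat ≤ f → q.toNat ≤ g →
    stepFuel f (c * q) c = (if stripTwos g q = 1 then "YES" else "NO") := by
  induction n with
  | zero => intro q c f g hc hq hn _ _; omega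
  | succ n ih =>
    intro q c f g hc hq hn hf hg
    obtain ⟨f, rfl⟩ : ∃ f', f = f' + 1 := ⟨f - 1, by omega⟩
    obtain ⟨g, rfl⟩ : ∃ g', g = g' + 1 := ⟨g - 1, by omega⟩
    have hN1 : c * q ≠ 1 := by nlinarith
    have hle : c ≤ c * q := by nlinarith
    have hne : c * q ≠ c := by nlinarith
    simp only [stepFuel]
    rw [if_neg hN1, if_pos hle, if_neg hne]
    by_cases hev : q % 2 = 0
    · rw [stripTwos_even g q hq hev]
      by_cases h2 : q / 2 = 1
      · -- q = 2 : A sees N = c*2 and answers YES next step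
        have hq2 : q = 2 := by omega
        subst hq2
        rw [stripTwos_of_le_one g _ (by omega), if_pos (by norm_num)]
        obtain ⟨f, rfl⟩ : ∃ f', f = f' + 1 := ⟨f - 1, by omega⟩
        simp only [stepFuel]
        rw [if_neg hN1, if_pos (by nlinarith)]; simp
      · have hq2 : 2 ≤ q / 2 := by omega
        have heq : c * q = c * 2 * (q / 2) := by
          rw [mul_assoc]; congr 1; omega
        rw [heq]
        exact ih (q / 2) (c * 2) f g (by omega) hq2 (by omega) (by omega) (by omega)
    · -- q odd (and ≥ 3): B's loop is stuck with q ≠ 1; A never hits c·2^(j+1)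
      rw [stripTwos_odd (g + 1) q hev, if_neg (by omega)]
      apply stepFuel_no _ _ _ hN1
      intro j hj
      have h' : c * q = c * (2 * 2 ^ j) := by rw [hj]; ring
      have hq' : q = 2 * 2 ^ j := mul_left_cancel₀ (by omega : c ≠ 0) h'
      have : (2:Int) ∣ q := ⟨2 ^ j, hq'⟩
      omega

-- ===== VERDICT (by name: the statement is the Claim_ definition above) =====
theorem step_spec : Claim_equal_step := by
  intro N c _ hpre
  unfold Spec_step step step_alt
  by_cases h1 : N = 1
  · subst h1; simp [stepFuel]
  · by_cases hNc : N = c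
    · subst hNc; simp [stepFuel, h1]
    · rw [if_neg (by tauto)]
      by_cases hc : 1 ≤ c
      · by_cases hlt : c ≤ N
        · -- 1 ≤ c < N
          have hltN : c < N := lt_of_le_of_ne hlt (fun h => hNc h.symm)
          by_cases hdvd : PySem.Int.mod N c = 0
          · rw [if_neg (by push_neg; exact ⟨by omega, hdvd⟩)]
            set q := PySem.Int.floordiv N c with hq
            have hqc : q * c + 0 = N := by
              rw [← hdvd, hq]; exact PySem.Int.floordiv_mul_add_mod N c
            have hqc' : q * c = N := by omega
            have hq2 : 2 ≤ q := by nlinarith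
            have hNcq : N = c * q := by rw [← hqc']; ring
            have hfuel : q ≤ N - c + 1 := by nlinarith
            rw [hNcq]
            exact bridge q.toNat q c _ _ hc hq2 le_rfl (by omega) le_rfl
          · rw [if_pos (Or.inr hdvd)]
            apply stepFuel_no _ _ _ h1
            intro j hj
            exact hdvd ((PySem.Int.mod_eq_zero_iff_dvd N c).mpr ⟨2 ^ j, hj⟩)
        · -- 1 ≤ c, N < c : both NO
          push_neg at hlt
          have hz : (N - c).toNat = 0 := by omega
          rw [hz]
          simp only [stepFuel]
          rw [if_neg h1, if_neg (by omega)]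
          by_cases hdvd : PySem.Int.mod N c = 0
          · rw [if_neg (by push_neg; exact ⟨by omega, hdvd⟩)]
            have hq0 : PySem.Int.floordiv N c < 1 := by
              have := PySem.Int.floordiv_mul_add_mod N c
              have hmb := PySem.Int.mod_nonneg N (by omega : (0:Int) < c)
              nlinarith [PySem.Int.floordiv_mul_add_mod N c]
            rw [stripTwos_of_le_one _ _ (by omega), if_neg (by omega)]
          · rw [if_pos (Or.inr hdvd)]
      · -- c ≤ 0: Pre_ forces N < c ≤ 0; both NO
        have hlt : N < c := by
          rcases hpre with h | h | h
          · exact absurd h h1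
          · omega
          · exact lt_of_le_of_ne h hNc
        have hz : (N - c).toNat = 0 := by omega
        rw [hz]
        simp only [stepFuel]
        rw [if_neg h1, if_neg (by omega), if_pos (Or.inl (by omega))]
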